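-- pv_equiv track=rewrite | github.com/panchal-ravi/agentic-iam-guardrails | web-app-deprecated/services/response_normalization.py | decode_escaped_plaintext
-- ===== SOURCE A (Python) =====
-- def decode_escaped_plaintext(content: str) -> str:
--     """Decode JSON-style escaped plain text returned inside text/plain streams."""
--     escape_markers = ("\\r\\n", "\\n", "\\r", "\\t", '\\"', "\\/")
--     if not any(marker in content for marker in escape_markers):
--         return content
--
--     stripped = content.strip()
--     looks_wrapped = stripped.startswith('"') and (
--         stripped.endswith('"') or "\\n" in stripped or '\\"' in stripped
--     )
--     looks_escaped_multiline = "\\n" in content and "\n" not in content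
--     looks_escaped_quotes = '\\"' in content and '"' not in content
--     if not (looks_wrapped or looks_escaped_multiline or looks_escaped_quotes):
--         return content
--
--     prefix_length = len(content) - len(content.lstrip())
--     suffix_length = len(content) - len(content.rstrip())
--     prefix = content[:prefix_length]
--     suffix = content[len(content) - suffix_length :] if suffix_length else ""
--     body = stripped
--
--     if body.startswith('"'):
--         body = body[1:]
--     if body.endswith('"') and not body.endswith('\\"'):
--         body = body[:-1]
--
--     body = (
--         body.replace("\\r\\n", "\n")
--         .replace("\\n", "\n")
--         .replace("\\r", "\r")
--         .replace("\\t", "\t")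
--         .replace('\\"', '"')
--         .replace("\\/", "/")
--     )
--     return f"{prefix}{body}{suffix}"
-- ===== SOURCE B (Python) =====
-- def decode_escaped_plaintext(content: str) -> str:
--     """Decode JSON-style escaped plain text returned inside text/plain streams."""
--     pairs = list(zip(content, content[1:]))
--
--     def esc(seq, d):
--         return any(a == '\\' and b == d for a, b in seq)
--
--     if not any(esc(pairs, d) for d in 'nrt"/'):
--         return content
--
--     chars = list(content)
--     i = 0
--     while i < len(chars) and chars[i].isspace():
--         i += 1
--     j = len(chars)
--     while j > i and chars[j - 1].isspace():
--         j -= 1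
--     core = chars[i:j]
--     cpairs = list(zip(core, core[1:]))
--
--     wrapped = bool(core) and core[0] == '"' and (
--         core[-1] == '"' or esc(cpairs, 'n') or esc(cpairs, '"')
--     )
--     multiline = esc(pairs, 'n') and '\n' not in chars
--     quoted = esc(pairs, '"') and '"' not in chars
--     if not (wrapped or multiline or quoted):
--         return content
--
--     body = core
--     if body and body[0] == '"':
--         body = body[1:]
--     if body and body[-1] == '"' and not (len(body) >= 2 and body[-2] == '\\'):
--         body = body[:-1]
--
--     out = []
--     k = 0
--     n = len(body)
--     while k < n:
--         c = body[k]
--         if c == '\\' and k + 1 < n: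
--             d = body[k + 1]
--             if d == 'r' and k + 3 < n and body[k + 2] == '\\' and body[k + 3] == 'n':
--                 out.append('\n'); k += 4; continue
--             if d == 'n':
--                 out.append('\n'); k += 2; continue
--             if d == 'r':
--                 out.append('\r'); k += 2; continue
--             if d == 't':
--                 out.append('\t'); k += 2; continue
--             if d == '"':
--                 out.append('"'); k += 2; continue
--             if d == '/':
--                 out.append('/'); k += 2; continue
--         out.append(c); k += 1
--     return content[:i] + ''.join(out) + content[j:]
-- ===== Notes on version B (the rewrite author's own statement) =====
-- stated objective: alternative
-- what changed: B rebuilds the whole function on different primitives: escape markers are detected by scanning adjacent character pairs (zip) instead of six substring searches, the whitespace prefix/body/suffix split is done with two index scans instead of strip/lstrip/rstrip length arithmetic and slices, quote trimming tests the first/last characters directly, and the six sequential .replace() passes become a single left-to-right decoding scan.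
import Mathlib
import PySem

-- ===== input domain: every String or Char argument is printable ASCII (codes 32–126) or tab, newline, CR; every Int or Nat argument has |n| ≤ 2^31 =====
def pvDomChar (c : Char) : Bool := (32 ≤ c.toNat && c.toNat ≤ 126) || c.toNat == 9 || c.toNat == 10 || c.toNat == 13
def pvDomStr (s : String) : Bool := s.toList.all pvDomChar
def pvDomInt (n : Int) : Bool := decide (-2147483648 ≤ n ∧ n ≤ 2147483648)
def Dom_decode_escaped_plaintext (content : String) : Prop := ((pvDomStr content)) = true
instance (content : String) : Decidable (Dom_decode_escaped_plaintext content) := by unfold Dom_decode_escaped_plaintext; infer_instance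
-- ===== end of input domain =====

-- B rebuilds the whole function on different primitives: escape markers are detected by scanning
-- adjacent character pairs (zip) instead of substring searches, the whitespace prefix/body/suffix
-- split is done with takeWhile/dropWhile index scans instead of strip/lstrip/rstrip length
-- arithmetic and slices, quote trimming tests head?/getLast? directly, and the six sequential
-- .replace() passes become one recursive left-to-right decoding scan. Same return value.

-- ===== PORT A =====
-- the escape_markers tuple
def pvMarkers : List (List Char) :=
  [['\\','r','\\','n'], ['\\','n'], ['\\','r'], ['\\','t'], ['\\','"'], ['\\','/']]

-- body.replace("\\r\\n","\n").replace("\\n","\n").replace("\\r","\r").replace("\\t","\t").replace('\\"','"').replace("\\/","/")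
def pvReplChain (body : List Char) : List Char :=
  PySem.Chars.replace (PySem.Chars.replace (PySem.Chars.replace (PySem.Chars.replace
    (PySem.Chars.replace (PySem.Chars.replace body ['\\','r','\\','n'] ['\n'])
      ['\\','n'] ['\n']) ['\\','r'] ['\r']) ['\\','t'] ['\t']) ['\\','"'] ['"']) ['\\','/'] ['/']

def decode_escaped_plaintext (content : String) : String :=
  let cs := content.toList
  if !(pvMarkers.any (fun m => PySem.Chars.isIn m cs)) then content
  else
    let stripped := PySem.Chars.strip cs
    let looks_wrapped := PySem.Chars.startswith stripped ['"'] &&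
      (PySem.Chars.endswith stripped ['"'] || PySem.Chars.isIn ['\\','n'] stripped ||
        PySem.Chars.isIn ['\\','"'] stripped)
    let looks_escaped_multiline := PySem.Chars.isIn ['\\','n'] cs && !(PySem.Chars.isIn ['\n'] cs)
    let looks_escaped_quotes := PySem.Chars.isIn ['\\','"'] cs && !(PySem.Chars.isIn ['"'] cs)
    if !(looks_wrapped || looks_escaped_multiline || looks_escaped_quotes) then content
    else
      let prefix_length : Nat := cs.length - (PySem.Chars.lstrip cs).length
      let suffix_length : Nat := cs.length - (PySem.Chars.rstrip cs).length
      let pre := PySem.List.slice cs none (some (prefix_length : Int))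
      let suffix := if suffix_length ≠ 0 then PySem.List.slice cs (some ((cs.length : Int) - (suffix_length : Int))) none else []
      let body := stripped
      let body := if PySem.Chars.startswith body ['"'] then PySem.List.slice body (some 1) none else body
      let body := if PySem.Chars.endswith body ['"'] && !(PySem.Chars.endswith body ['\\','"']) then PySem.List.slice body none (some (-1)) else body
      String.ofList (pre ++ pvReplChain body ++ suffix)

-- ===== PORT B =====
-- any(a == '\\' and b == d for a, b in zip(s, s[1:]))
def pvEsc (cs : List Char) (d : Char) : Bool :=
  (cs.zip cs.tail).any (fun p => p.1 == '\\' && p.2 == d)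

-- the while-k decoding scan: first matching escape at the cursor, else copy one char
def pvDecodeScan : List Char → List Char
  | '\\' :: 'r' :: '\\' :: 'n' :: t => '\n' :: pvDecodeScan t
  | '\\' :: 'n' :: t => '\n' :: pvDecodeScan t
  | '\\' :: 'r' :: t => '\r' :: pvDecodeScan t
  | '\\' :: 't' :: t => '\t' :: pvDecodeScan t
  | '\\' :: '"' :: t => '"' :: pvDecodeScan t
  | '\\' :: '/' :: t => '/' :: pvDecodeScan t
  | c :: t => c :: pvDecodeScan t
  | [] => []

def decode_escaped_plaintext_alt (content : String) : String :=
  let cs := content.toList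
  if !(pvEsc cs 'n' || pvEsc cs 'r' || pvEsc cs 't' || pvEsc cs '"' || pvEsc cs '/') then content
  else
    -- the two index scans i (from the left) and j (from the right) over chars
    let pre := cs.takeWhile PySem.Chars.isspace
    let rest := cs.dropWhile PySem.Chars.isspace
    let core := (rest.reverse.dropWhile PySem.Chars.isspace).reverse
    let trail := (rest.reverse.takeWhile PySem.Chars.isspace).reverse
    let wrapped := (core.head? == some '"') &&
      ((core.getLast? == some '"') || pvEsc core 'n' || pvEsc core '"')
    let multiline := pvEsc cs 'n' && !(cs.contains '\n')
    let quoted := pvEsc cs '"' && !(cs.contains '"')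
    if !(wrapped || multiline || quoted) then content
    else
      let body := if core.head? == some '"' then core.tail else core
      let body := if (body.getLast? == some '"') && !(body.reverse.tail.head? == some '\\')
                  then body.dropLast else body
      String.ofList (pre ++ pvDecodeScan body ++ trail)

-- ===== PRECONDITION & SPEC =====
def Spec_decode_escaped_plaintext (content : String) (out : String) : Prop := out = decode_escaped_plaintext_alt content
instance (content : String) (out : String) : Decidable (Spec_decode_escaped_plaintext content out) := by unfold Spec_decode_escaped_plaintext; infer_instance

-- ===== CLAIM (what is proved, stated in full; the proofs are below) =====
def Claim_equal_decode_escaped_plaintext : Prop := ∀ (content : String), Dom_decode_escaped_plaintext content → Spec_decode_escaped_plaintext content (decode_escaped_plaintext content)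

-- ===== LEMMAS AND PROOFS =====

-- pair-scan presence equals two-character substring presence
theorem pv_pair_any (a b : Char) (cs : List Char) :
    ((cs.zip cs.tail).any (fun p => p.1 == a && p.2 == b)) = PySem.Chars.isIn [a,b] cs := by
  rw [Bool.eq_iff_iff, PySem.Chars.isIn_iff_infix]
  induction cs with
  | nil => simp
  | cons c t ih =>
    cases t with
    | nil =>
      simp only [List.tail_cons, List.zip_nil_right, List.any_nil]
      constructor
      · intro h; simp at h
      · intro h; have := h.sublist.length_le; simp at this
    | cons d u =>
      rw [List.infix_cons_iff]
      simp only [List.tail_cons, List.zip_cons_cons, List.any_cons, ← ih,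
        List.cons_prefix_cons, List.nil_prefix, and_true, Bool.or_eq_true,
        Bool.and_eq_true, beq_iff_eq]
      constructor
      · rintro (⟨h1, h2⟩ | h) <;> [exact Or.inl ⟨h1.symm, h2.symm⟩; exact Or.inr h]
      · rintro (⟨h1, h2⟩ | h) <;> [exact Or.inl ⟨h1.symm, h2.symm⟩; exact Or.inr h]

theorem pv_esc_eq (cs : List Char) (d : Char) : pvEsc cs d = PySem.Chars.isIn ['\\', d] cs :=
  pv_pair_any '\\' d cs

-- A's six-marker test equals B's five pair tests ('\\r\\n' is subsumed by '\\r')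
theorem pv_guard1 (cs : List Char) :
    pvMarkers.any (fun m => PySem.Chars.isIn m cs) =
      (pvEsc cs 'n' || pvEsc cs 'r' || pvEsc cs 't' || pvEsc cs '"' || pvEsc cs '/') := by
  simp only [pvMarkers, List.any_cons, List.any_nil, Bool.or_false, pv_esc_eq]
  cases h4 : PySem.Chars.isIn ['\\','r','\\','n'] cs with
  | false => simp [Bool.or_assoc, Bool.or_comm, Bool.or_left_comm]
  | true =>
    have hr : PySem.Chars.isIn ['\\','r'] cs = true := by
      rw [PySem.Chars.isIn_iff_infix] at h4 ⊢
      exact List.IsInfix.trans ⟨[], ['\\','n'], rfl⟩ h4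
    simp [hr]

theorem pv_singleton_isIn (c : Char) (cs : List Char) :
    PySem.Chars.isIn [c] cs = cs.contains c := by
  rw [Bool.eq_iff_iff, PySem.Chars.isIn_iff_infix, List.singleton_infix_iff]
  simp

theorem pv_startswith_head (a : Char) (l : List Char) :
    PySem.Chars.startswith l [a] = (l.head? == some a) := by
  cases l with
  | nil => rfl
  | cons c t => simp [PySem.Chars.startswith, List.isPrefixOf, BEq.comm]

theorem pv_endswith_getLast (a : Char) (l : List Char) :
    PySem.Chars.endswith l [a] = (l.getLast? == some a) := by
  rw [show PySem.Chars.endswith l [a] = [a].isSuffixOf l from rfl, List.isSuffixOf,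
    List.getLast?_eq_head?_reverse]
  cases l.reverse with
  | nil => rfl
  | cons c t => simp [List.isPrefixOf, BEq.comm]

theorem pv_endswith2 (a b : Char) (l : List Char) :
    PySem.Chars.endswith l [a,b] =
      ((l.getLast? == some b) && (l.reverse.tail.head? == some a)) := by
  rw [show PySem.Chars.endswith l [a,b] = [a,b].isSuffixOf l from rfl, List.isSuffixOf,
    List.getLast?_eq_head?_reverse]
  cases l.reverse with
  | nil => rfl
  | cons c t =>
    cases t with
    | nil => simp [List.isPrefixOf, BEq.comm]
    | cons d u => simp [List.isPrefixOf, BEq.comm, Bool.and_comm]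

-- from an escape pair, a backslash is in the string
theorem pv_esc_mem (cs : List Char) (d : Char) (h : pvEsc cs d = true) : '\\' ∈ cs := by
  unfold pvEsc at h
  simp only [List.any_eq_true, Bool.and_eq_true, beq_iff_eq] at h
  obtain ⟨p, hp, h1, h2⟩ := h
  have hm := List.of_mem_zip hp
  exact h1 ▸ hm.1

theorem pv_take_takeWhile (p : Char → Bool) (l : List Char) :
    l.take (l.takeWhile p).length = l.takeWhile p := by
  induction l with
  | nil => rfl
  | cons c t ih =>
    by_cases h : p c
    · simp [h, ih]
    · simp [h]

theorem pv_len_takeWhile_add (p : Char → Bool) (l : List Char) :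
    (l.takeWhile p).length + (l.dropWhile p).length = l.length := by
  rw [← List.length_append, List.takeWhile_append_dropWhile]

-- the strip decompositions, under a non-space char being present
theorem pv_dropWhile_rev_ne (cs : List Char) (h : cs.dropWhile PySem.Chars.isspace ≠ []) :
    ((cs.dropWhile PySem.Chars.isspace).reverse.dropWhile PySem.Chars.isspace) ≠ [] := by
  intro hnil
  obtain ⟨c, t, hct⟩ := List.exists_cons_of_ne_nil h
  have hc : PySem.Chars.isspace c = false := by
    have := List.head_dropWhile_not PySem.Chars.isspace (l := cs) (by simp [hct])
    simpa [hct] using this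
  have hall := List.dropWhile_eq_nil_iff.mp hnil
  have : PySem.Chars.isspace c = true := hall c (by simp [hct])
  simp [hc] at this

theorem pv_rstrip_decomp (cs : List Char) (h : cs.dropWhile PySem.Chars.isspace ≠ []) :
    PySem.Chars.rstrip cs =
      cs.takeWhile PySem.Chars.isspace ++
        ((cs.dropWhile PySem.Chars.isspace).reverse.dropWhile PySem.Chars.isspace).reverse := by
  have hsplit : cs.reverse = (cs.dropWhile PySem.Chars.isspace).reverse ++ (cs.takeWhile PySem.Chars.isspace).reverse := by
    rw [← List.reverse_append, List.takeWhile_append_dropWhile]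
  rw [PySem.Chars.rstrip, hsplit, List.dropWhile_append]
  rw [if_neg (by simpa using pv_dropWhile_rev_ne cs h)]
  simp

theorem pv_rest_decomp (rest : List Char) :
    rest = (rest.reverse.dropWhile PySem.Chars.isspace).reverse ++
        (rest.reverse.takeWhile PySem.Chars.isspace).reverse := by
  rw [← List.reverse_append, List.takeWhile_append_dropWhile, List.reverse_reverse]

theorem pv_cs_decomp (cs : List Char) :
    cs = cs.takeWhile PySem.Chars.isspace ++
        ((cs.dropWhile PySem.Chars.isspace).reverse.dropWhile PySem.Chars.isspace).reverse ++
        ((cs.dropWhile PySem.Chars.isspace).reverse.takeWhile PySem.Chars.isspace).reverse := by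
  conv_lhs => rw [← List.takeWhile_append_dropWhile (p := PySem.Chars.isspace) (l := cs)]
  rw [List.append_assoc]
  congr 1
  exact pv_rest_decomp _

-- ---- the decoder: A's replace chain equals B's one-pass scan ----

theorem pv_go_acc (old new : List Char) : ∀ (fuel : Nat) (l acc : List Char),
    PySem.Chars.replace.go old new fuel l acc = acc.reverse ++ PySem.Chars.replace.go old new fuel l [] := by
  intro fuel
  induction fuel with
  | zero => intro l acc; rw [PySem.Chars.replace.go, PySem.Chars.replace.go]; simp
  | succ f ih =>
    intro l acc
    cases l with
    | nil =>
      rw [PySem.Chars.replace.go, PySem.Chars.replace.go]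
      · simp
      all_goals omega
    | cons c t =>
      rw [PySem.Chars.replace.go, PySem.Chars.replace.go]
      cases h : List.isPrefixOf old (c::t) with
      | true =>
        simp only [if_true]
        rw [ih _ (new.reverse ++ acc), ih _ (new.reverse ++ [])]
        simp
      | false =>
        simp only [Bool.false_eq_true, if_false]
        rw [ih t (c::acc), ih t [c]]
        simp

theorem pv_go_fuel (old new : List Char) (hne : old ≠ []) : ∀ (f1 f2 : Nat) (l acc : List Char),
    l.length ≤ f1 → l.length ≤ f2 →
    PySem.Chars.replace.go old new f1 l acc = PySem.Chars.replace.go old new f2 l acc := by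
  intro f1
  induction f1 with
  | zero =>
    intro f2 l acc h1 h2
    have : l = [] := by cases l <;> simp_all
    subst this
    cases f2 with
    | zero => rfl
    | succ g =>
      rw [PySem.Chars.replace.go, PySem.Chars.replace.go]
      · simp
      all_goals omega
  | succ f ih =>
    intro f2 l acc h1 h2
    cases l with
    | nil =>
      cases f2 with
      | zero =>
        rw [PySem.Chars.replace.go, PySem.Chars.replace.go]
        · simp
        all_goals omega
      | succ g => rfl
    | cons c t =>
      cases f2 with
      | zero => simp at h2
      | succ g =>
        rw [PySem.Chars.replace.go, PySem.Chars.replace.go]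
        have hone : 1 ≤ old.length := by cases old <;> simp_all
        simp only [List.length_cons, Nat.succ_le_succ_iff] at h1 h2
        cases h : List.isPrefixOf old (c::t) with
        | true =>
          simp only [if_true]
          apply ih
          · simp only [List.length_drop, List.length_cons]; omega
          · simp only [List.length_drop, List.length_cons]; omega
        | false =>
          simp only [Bool.false_eq_true, if_false]
          exact ih _ _ _ h1 h2

theorem pv_replace_eq_go (s old new : List Char) (hne : old.isEmpty = false) :
    PySem.Chars.replace s old new = PySem.Chars.replace.go old new s.length s [] := by
  rw [PySem.Chars.replace]
  simp [hne]

theorem pv_replace_nil (old new : List Char) (hne : old.isEmpty = false) :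
    PySem.Chars.replace [] old new = [] := by
  rw [pv_replace_eq_go _ _ _ hne]
  rfl

theorem pv_replace_cons (c : Char) (s old new : List Char)
    (h : List.isPrefixOf old (c::s) = false) :
    PySem.Chars.replace (c::s) old new = c :: PySem.Chars.replace s old new := by
  have hne : old.isEmpty = false := by
    cases old with
    | nil => simp [List.isPrefixOf] at h
    | cons _ _ => rfl
  rw [pv_replace_eq_go _ _ _ hne, pv_replace_eq_go _ _ _ hne]
  simp only [List.length_cons]
  rw [PySem.Chars.replace.go]
  simp only [h, Bool.false_eq_true, if_false]
  rw [pv_go_acc]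
  rfl

theorem pv_replace_prefix (s old new : List Char) (hne : old.isEmpty = false)
    (h : List.isPrefixOf old s = true) :
    PySem.Chars.replace s old new = new ++ PySem.Chars.replace (s.drop old.length) old new := by
  have hone : 1 ≤ old.length := by cases old <;> simp_all
  cases s with
  | nil =>
    cases old with
    | nil => simp at hne
    | cons _ _ => simp [List.isPrefixOf] at h
  | cons c t =>
    rw [pv_replace_eq_go _ _ _ hne, pv_replace_eq_go _ _ _ hne]
    simp only [List.length_cons]
    rw [PySem.Chars.replace.go]
    simp only [h, if_true]
    rw [pv_go_acc]
    simp only [List.append_nil, List.reverse_reverse]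
    congr 1
    apply pv_go_fuel old new (by cases old <;> simp_all)
    · simp only [List.length_drop, List.length_cons]; omega
    · exact le_rfl

theorem pv_head_replace (s old : List Char) (d c : Char) (hne : old.isEmpty = false)
    (h : (PySem.Chars.replace s old [d]).head? = some c) : c = d ∨ s.head? = some c := by
  cases s with
  | nil => rw [pv_replace_nil _ _ hne] at h; simp at h
  | cons x t =>
    cases hp : List.isPrefixOf old (x::t) with
    | true =>
      rw [pv_replace_prefix _ _ _ hne hp] at h
      simp at h
      exact Or.inl h.symm
    | false =>
      rw [pv_replace_cons _ _ _ _ hp] at h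
      simp at h
      exact Or.inr (by simp [h])

-- [a,b].isPrefixOf (c :: X) characterisation
theorem pv_pair_prefix (a b c : Char) (X : List Char) :
    List.isPrefixOf [a,b] (c::X) = true ↔ (a = c ∧ X.head? = some b) := by
  cases X with
  | nil =>
    constructor
    · intro h; simp [List.isPrefixOf] at h
    · rintro ⟨-, h⟩; simp at h
  | cons y t =>
    show ((a == c) && ((b == y) && true)) = true ↔ _
    simp [beq_iff_eq]
    tauto

-- one replace step when the first pattern char mismatches the head
theorem pv_replace_cons_ne (a c : Char) (p X new : List Char) (h : (a == c) = false) :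
    PySem.Chars.replace (c::X) (a::p) new = c :: PySem.Chars.replace X (a::p) new :=
  pv_replace_cons _ _ _ _ (by simp [List.isPrefixOf, h])

-- one replace step when the second pattern char mismatches the second char
theorem pv_replace_cons_ne2 (a b c d : Char) (p X new : List Char) (h : (b == d) = false) :
    PySem.Chars.replace (c::d::X) (a::b::p) new = c :: PySem.Chars.replace (d::X) (a::b::p) new :=
  pv_replace_cons _ _ _ _ (by simp [List.isPrefixOf, h])

-- a two-char pattern firing at the head
theorem pv_replace_pair_hit (a b : Char) (X new : List Char) :
    PySem.Chars.replace (a::b::X) [a,b] new = new ++ PySem.Chars.replace X [a,b] new := by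
  rw [pv_replace_prefix _ _ _ rfl (by simp [List.isPrefixOf])]
  simp

-- the four-char pattern "\\r\\n" firing at the head
theorem pv_replace_quad_hit (t new : List Char) :
    PySem.Chars.replace ('\\'::'r'::'\\'::'n'::t) ['\\','r','\\','n'] new =
      new ++ PySem.Chars.replace t ['\\','r','\\','n'] new := by
  rw [pv_replace_prefix _ _ _ rfl (by simp [List.isPrefixOf])]
  simp

-- A's six replaces on each marker shape
theorem pv_chain_rn (t : List Char) :
    pvReplChain ('\\'::'r'::'\\'::'n'::t) = '\n' :: pvReplChain t := by
  unfold pvReplChain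
  rw [pv_replace_quad_hit t ['\n'], List.singleton_append]
  rw [pv_replace_cons_ne '\\' '\n' ['n'] _ ['\n'] (by decide)]
  rw [pv_replace_cons_ne '\\' '\n' ['r'] _ ['\x0d'] (by decide)]
  rw [pv_replace_cons_ne '\\' '\n' ['t'] _ ['\t'] (by decide)]
  rw [pv_replace_cons_ne '\\' '\n' ['"'] _ ['"'] (by decide)]
  rw [pv_replace_cons_ne '\\' '\n' ['/'] _ ['/'] (by decide)]

theorem pv_chain_n (t : List Char) :
    pvReplChain ('\\'::'n'::t) = '\n' :: pvReplChain t := by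
  unfold pvReplChain
  rw [pv_replace_cons_ne2 '\\' 'r' '\\' 'n' ['\\','n'] t ['\n'] (by decide)]
  rw [pv_replace_cons_ne '\\' 'n' ['r','\\','n'] t ['\n'] (by decide)]
  rw [pv_replace_pair_hit '\\' 'n' _ ['\n'], List.singleton_append]
  rw [pv_replace_cons_ne '\\' '\n' ['r'] _ ['\x0d'] (by decide)]
  rw [pv_replace_cons_ne '\\' '\n' ['t'] _ ['\t'] (by decide)]
  rw [pv_replace_cons_ne '\\' '\n' ['"'] _ ['"'] (by decide)]
  rw [pv_replace_cons_ne '\\' '\n' ['/'] _ ['/'] (by decide)]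

theorem pv_chain_r (t : List Char) (h : List.isPrefixOf ['\\','n'] t = false) :
    pvReplChain ('\\'::'r'::t) = '\x0d' :: pvReplChain t := by
  unfold pvReplChain
  rw [pv_replace_cons '\\' ('r'::t) ['\\','r','\\','n'] ['\n'] (by simp [List.isPrefixOf, h])]
  rw [pv_replace_cons_ne '\\' 'r' ['r','\\','n'] t ['\n'] (by decide)]
  rw [pv_replace_cons_ne2 '\\' 'n' '\\' 'r' [] _ ['\n'] (by decide)]
  rw [pv_replace_cons_ne '\\' 'r' ['n'] _ ['\n'] (by decide)]
  rw [pv_replace_pair_hit '\\' 'r' _ ['\x0d'], List.singleton_append]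
  rw [pv_replace_cons_ne '\\' '\x0d' ['t'] _ ['\t'] (by decide)]
  rw [pv_replace_cons_ne '\\' '\x0d' ['"'] _ ['"'] (by decide)]
  rw [pv_replace_cons_ne '\\' '\x0d' ['/'] _ ['/'] (by decide)]

theorem pv_chain_t (t : List Char) :
    pvReplChain ('\\'::'t'::t) = '\t' :: pvReplChain t := by
  unfold pvReplChain
  rw [pv_replace_cons_ne2 '\\' 'r' '\\' 't' ['\\','n'] t ['\n'] (by decide)]
  rw [pv_replace_cons_ne '\\' 't' ['r','\\','n'] t ['\n'] (by decide)]
  rw [pv_replace_cons_ne2 '\\' 'n' '\\' 't' [] _ ['\n'] (by decide)]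
  rw [pv_replace_cons_ne '\\' 't' ['n'] _ ['\n'] (by decide)]
  rw [pv_replace_cons_ne2 '\\' 'r' '\\' 't' [] _ ['\x0d'] (by decide)]
  rw [pv_replace_cons_ne '\\' 't' ['r'] _ ['\x0d'] (by decide)]
  rw [pv_replace_pair_hit '\\' 't' _ ['\t'], List.singleton_append]
  rw [pv_replace_cons_ne '\\' '\t' ['"'] _ ['"'] (by decide)]
  rw [pv_replace_cons_ne '\\' '\t' ['/'] _ ['/'] (by decide)]

theorem pv_chain_q (t : List Char) :
    pvReplChain ('\\'::'"'::t) = '"' :: pvReplChain t := by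
  unfold pvReplChain
  rw [pv_replace_cons_ne2 '\\' 'r' '\\' '"' ['\\','n'] t ['\n'] (by decide)]
  rw [pv_replace_cons_ne '\\' '"' ['r','\\','n'] t ['\n'] (by decide)]
  rw [pv_replace_cons_ne2 '\\' 'n' '\\' '"' [] _ ['\n'] (by decide)]
  rw [pv_replace_cons_ne '\\' '"' ['n'] _ ['\n'] (by decide)]
  rw [pv_replace_cons_ne2 '\\' 'r' '\\' '"' [] _ ['\x0d'] (by decide)]
  rw [pv_replace_cons_ne '\\' '"' ['r'] _ ['\x0d'] (by decide)]
  rw [pv_replace_cons_ne2 '\\' 't' '\\' '"' [] _ ['\t'] (by decide)]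
  rw [pv_replace_cons_ne '\\' '"' ['t'] _ ['\t'] (by decide)]
  rw [pv_replace_pair_hit '\\' '"' _ ['"'], List.singleton_append]
  rw [pv_replace_cons_ne '\\' '"' ['/'] _ ['/'] (by decide)]

theorem pv_chain_s (t : List Char) :
    pvReplChain ('\\'::'/'::t) = '/' :: pvReplChain t := by
  unfold pvReplChain
  rw [pv_replace_cons_ne2 '\\' 'r' '\\' '/' ['\\','n'] t ['\n'] (by decide)]
  rw [pv_replace_cons_ne '\\' '/' ['r','\\','n'] t ['\n'] (by decide)]
  rw [pv_replace_cons_ne2 '\\' 'n' '\\' '/' [] _ ['\n'] (by decide)]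
  rw [pv_replace_cons_ne '\\' '/' ['n'] _ ['\n'] (by decide)]
  rw [pv_replace_cons_ne2 '\\' 'r' '\\' '/' [] _ ['\x0d'] (by decide)]
  rw [pv_replace_cons_ne '\\' '/' ['r'] _ ['\x0d'] (by decide)]
  rw [pv_replace_cons_ne2 '\\' 't' '\\' '/' [] _ ['\t'] (by decide)]
  rw [pv_replace_cons_ne '\\' '/' ['t'] _ ['\t'] (by decide)]
  rw [pv_replace_cons_ne2 '\\' '"' '\\' '/' [] _ ['"'] (by decide)]
  rw [pv_replace_cons_ne '\\' '/' ['"'] _ ['"'] (by decide)]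
  rw [pv_replace_pair_hit '\\' '/' _ ['/'], List.singleton_append]

theorem pv_chain_nil : pvReplChain [] = [] := by
  unfold pvReplChain
  rw [pv_replace_nil ['\\','r','\\','n'] ['\n'] (by decide)]
  rw [pv_replace_nil ['\\','n'] ['\n'] (by decide)]
  rw [pv_replace_nil ['\\','r'] ['\x0d'] (by decide)]
  rw [pv_replace_nil ['\\','t'] ['\t'] (by decide)]
  rw [pv_replace_nil ['\\','"'] ['"'] (by decide)]
  rw [pv_replace_nil ['\\','/'] ['/'] (by decide)]

theorem pv_chain_cons (c : Char) (t : List Char)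
    (h1 : List.isPrefixOf ['\\','r','\\','n'] (c::t) = false)
    (h2 : List.isPrefixOf ['\\','n'] (c::t) = false)
    (h3 : List.isPrefixOf ['\\','r'] (c::t) = false)
    (h4 : List.isPrefixOf ['\\','t'] (c::t) = false)
    (h5 : List.isPrefixOf ['\\','"'] (c::t) = false)
    (h6 : List.isPrefixOf ['\\','/'] (c::t) = false) :
    pvReplChain (c::t) = c :: pvReplChain t := by
  unfold pvReplChain
  rw [pv_replace_cons _ _ _ _ h1]
  rw [pv_replace_cons _ _ _ _ (by
    rw [Bool.eq_false_iff]; intro hp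
    rw [pv_pair_prefix] at hp
    obtain ⟨hc, hh⟩ := hp
    rcases pv_head_replace _ _ _ _ rfl hh with h | h
    · exact absurd h (by decide)
    · rw [Bool.eq_false_iff] at h2; exact h2 (by rw [pv_pair_prefix]; exact ⟨hc, h⟩))]
  rw [pv_replace_cons _ _ _ _ (by
    rw [Bool.eq_false_iff]; intro hp
    rw [pv_pair_prefix] at hp
    obtain ⟨hc, hh⟩ := hp
    rcases pv_head_replace _ _ _ _ rfl hh with h | h
    · exact absurd h (by decide)
    rcases pv_head_replace _ _ _ _ rfl h with h' | h'
    · exact absurd h' (by decide)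
    · rw [Bool.eq_false_iff] at h3; exact h3 (by rw [pv_pair_prefix]; exact ⟨hc, h'⟩))]
  rw [pv_replace_cons _ _ _ _ (by
    rw [Bool.eq_false_iff]; intro hp
    rw [pv_pair_prefix] at hp
    obtain ⟨hc, hh⟩ := hp
    rcases pv_head_replace _ _ _ _ rfl hh with h | h
    · exact absurd h (by decide)
    rcases pv_head_replace _ _ _ _ rfl h with h' | h'
    · exact absurd h' (by decide)
    rcases pv_head_replace _ _ _ _ rfl h' with h'' | h''
    · exact absurd h'' (by decide)
    · rw [Bool.eq_false_iff] at h4; exact h4 (by rw [pv_pair_prefix]; exact ⟨hc, h''⟩))]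
  rw [pv_replace_cons _ _ _ _ (by
    rw [Bool.eq_false_iff]; intro hp
    rw [pv_pair_prefix] at hp
    obtain ⟨hc, hh⟩ := hp
    rcases pv_head_replace _ _ _ _ rfl hh with h | h
    · exact absurd h (by decide)
    rcases pv_head_replace _ _ _ _ rfl h with h' | h'
    · exact absurd h' (by decide)
    rcases pv_head_replace _ _ _ _ rfl h' with h'' | h''
    · exact absurd h'' (by decide)
    rcases pv_head_replace _ _ _ _ rfl h'' with h3' | h3'
    · exact absurd h3' (by decide)
    · rw [Bool.eq_false_iff] at h5; exact h5 (by rw [pv_pair_prefix]; exact ⟨hc, h3'⟩))]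
  rw [pv_replace_cons _ _ _ _ (by
    rw [Bool.eq_false_iff]; intro hp
    rw [pv_pair_prefix] at hp
    obtain ⟨hc, hh⟩ := hp
    rcases pv_head_replace _ _ _ _ rfl hh with h | h
    · exact absurd h (by decide)
    rcases pv_head_replace _ _ _ _ rfl h with h' | h'
    · exact absurd h' (by decide)
    rcases pv_head_replace _ _ _ _ rfl h' with h'' | h''
    · exact absurd h'' (by decide)
    rcases pv_head_replace _ _ _ _ rfl h'' with h3' | h3'
    · exact absurd h3' (by decide)
    rcases pv_head_replace _ _ _ _ rfl h3' with h4' | h4'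
    · exact absurd h4' (by decide)
    · rw [Bool.eq_false_iff] at h6; exact h6 (by rw [pv_pair_prefix]; exact ⟨hc, h4'⟩))]

theorem pv_chain_eq_scan : ∀ (n : Nat) (l : List Char), l.length ≤ n →
    pvReplChain l = pvDecodeScan l := by
  intro n
  induction n with
  | zero =>
    intro l h
    have : l = [] := by cases l <;> simp_all
    subst this
    rw [pv_chain_nil]
    rfl
  | succ n ih =>
    intro l hl
    cases l with
    | nil =>
      rw [pv_chain_nil]
      rfl
    | cons c t =>
      simp only [List.length_cons, Nat.succ_le_succ_iff] at hl
      by_cases hc : c = '\\'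
      · subst hc
        cases t with
        | nil =>
          rw [pv_chain_cons _ _ (by decide) (by decide) (by decide) (by decide) (by decide) (by decide)]
          rw [ih [] (by simp)]
          rfl
        | cons q u =>
          by_cases hq : q = 'n'
          · subst hq
            rw [pv_chain_n, pvDecodeScan]
            exact congrArg _ (ih u (by simp at hl; omega))
          by_cases hq2 : q = 'r'
          · subst hq2
            by_cases hrn : List.isPrefixOf ['\\','n'] u = true
            · obtain ⟨v, hv⟩ : ∃ v, u = '\\'::'n'::v := by
                cases u with
                | nil => simp [List.isPrefixOf] at hrn
                | cons a w => cases w with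
                  | nil => simp [List.isPrefixOf] at hrn
                  | cons b v =>
                    simp [List.isPrefixOf, beq_iff_eq] at hrn
                    exact ⟨v, by simp [← hrn.1, ← hrn.2]⟩
              subst hv
              rw [pv_chain_rn, pvDecodeScan]
              exact congrArg _ (ih v (by simp at hl; omega))
            · rw [Bool.not_eq_true] at hrn
              rw [pv_chain_r _ hrn]
              have hscan : pvDecodeScan ('\\'::'r'::u) = '\r' :: pvDecodeScan u := by
                cases u with
                | nil => rfl
                | cons a w =>
                  by_cases ha : a = '\\'
                  · subst ha
                    cases w with
                    | nil => rfl
                    | cons b v =>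
                      by_cases hb : b = 'n'
                      · subst hb; simp [List.isPrefixOf] at hrn
                      · rw [pvDecodeScan.eq_def]; simp [hb]
                  · rw [pvDecodeScan.eq_def]; simp [ha]
              rw [hscan]
              exact congrArg _ (ih u (by simp at hl; omega))
          by_cases hq3 : q = 't'
          · subst hq3
            rw [pv_chain_t, pvDecodeScan]
            exact congrArg _ (ih u (by simp at hl; omega))
          by_cases hq4 : q = '"'
          · subst hq4
            rw [pv_chain_q, pvDecodeScan]
            exact congrArg _ (ih u (by simp at hl; omega))
          by_cases hq5 : q = '/'
          · subst hq5
            rw [pv_chain_s, pvDecodeScan]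
            exact congrArg _ (ih u (by simp at hl; omega))
          · rw [pv_chain_cons _ _ (by simp [List.isPrefixOf, Ne.symm hq2])
              (by simp [List.isPrefixOf, Ne.symm hq])
              (by simp [List.isPrefixOf, Ne.symm hq2])
              (by simp [List.isPrefixOf, Ne.symm hq3])
              (by simp [List.isPrefixOf, Ne.symm hq4])
              (by simp [List.isPrefixOf, Ne.symm hq5])]
            have hscan : pvDecodeScan ('\\'::q::u) = '\\' :: pvDecodeScan (q::u) := by
              rw [pvDecodeScan.eq_def]; simp [hq, hq2, hq3, hq4, hq5]
            rw [hscan]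
            exact congrArg _ (ih (q::u) (by simp at hl ⊢; omega))
      · rw [pv_chain_cons _ _ (by simp [List.isPrefixOf, Ne.symm hc])
          (by simp [List.isPrefixOf, Ne.symm hc])
          (by simp [List.isPrefixOf, Ne.symm hc])
          (by simp [List.isPrefixOf, Ne.symm hc])
          (by simp [List.isPrefixOf, Ne.symm hc])
          (by simp [List.isPrefixOf, Ne.symm hc])]
        have hscan : pvDecodeScan (c::t) = c :: pvDecodeScan t := by
          rw [pvDecodeScan.eq_def]; simp [hc]
        rw [hscan]
        exact congrArg _ (ih t hl)

theorem pv_chain_eq_scan' (l : List Char) : pvReplChain l = pvDecodeScan l :=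
  pv_chain_eq_scan l.length l (le_refl _)


theorem pv_strip_eq (cs : List Char) :
    PySem.Chars.strip cs = ((cs.dropWhile PySem.Chars.isspace).reverse.dropWhile PySem.Chars.isspace).reverse := rfl

theorem pv_slice_one (l : List Char) : PySem.List.slice l (some 1) none = l.tail := by
  have := PySem.List.slice_from_natCast l 1
  simpa [List.drop_one] using this

theorem pv_slice_neg_one (l : List Char) : PySem.List.slice l none (some (-1)) = l.dropLast := by
  simp [PySem.List.slice, List.dropLast_eq_take]

theorem pv_trim_cond (x y : Bool) : (x && !(x && y)) = (x && !y) := by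
  cases x <;> cases y <;> rfl

theorem pv_prefix_eq (cs : List Char) :
    PySem.List.slice cs none (some ((cs.length - (PySem.Chars.lstrip cs).length : Nat) : Int)) =
      cs.takeWhile PySem.Chars.isspace := by
  rw [PySem.List.slice_to_natCast]
  have h := pv_len_takeWhile_add PySem.Chars.isspace cs
  rw [show cs.length - (PySem.Chars.lstrip cs).length = (cs.takeWhile PySem.Chars.isspace).length by
    rw [PySem.Chars.lstrip]; omega]
  exact pv_take_takeWhile _ _

theorem pv_rest_ne (cs : List Char)
    (hg : (pvEsc cs 'n' || pvEsc cs 'r' || pvEsc cs 't' || pvEsc cs '"' || pvEsc cs '/') = true) :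
    cs.dropWhile PySem.Chars.isspace ≠ [] := by
  have hb : '\\' ∈ cs := by
    simp only [Bool.or_eq_true] at hg
    rcases hg with ((((h|h)|h)|h)|h) <;> exact pv_esc_mem _ _ h
  intro hnil
  exact absurd ((List.dropWhile_eq_nil_iff.mp hnil) '\\' hb) (by decide)

theorem pv_suffix_eq (cs : List Char) (h : cs.dropWhile PySem.Chars.isspace ≠ []) :
    (if cs.length - (PySem.Chars.rstrip cs).length ≠ 0 then
        PySem.List.slice cs
          (some ((cs.length : Int) - ((cs.length - (PySem.Chars.rstrip cs).length : Nat) : Int))) none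
     else []) =
    ((cs.dropWhile PySem.Chars.isspace).reverse.takeWhile PySem.Chars.isspace).reverse := by
  have hr := pv_rstrip_decomp cs h
  have hdec := pv_cs_decomp cs
  set pre := cs.takeWhile PySem.Chars.isspace with hpre
  set core := ((cs.dropWhile PySem.Chars.isspace).reverse.dropWhile PySem.Chars.isspace).reverse with hcore
  set trail := ((cs.dropWhile PySem.Chars.isspace).reverse.takeWhile PySem.Chars.isspace).reverse with htrail
  have hlen : cs.length = pre.length + core.length + trail.length := by
    conv_lhs => rw [hdec]
    simp [Nat.add_assoc]
  have hrl : (PySem.Chars.rstrip cs).length = pre.length + core.length := by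
    rw [hr]; simp
  by_cases ht : trail.length = 0
  · rw [if_neg (by omega)]
    exact (List.eq_nil_of_length_eq_zero ht).symm
  · rw [if_pos (by omega)]
    have hcast : (cs.length : Int) - ((cs.length - (PySem.Chars.rstrip cs).length : Nat) : Int) =
        ((pre.length + core.length : Nat) : Int) := by
      push_cast
      omega
    rw [hcast, PySem.List.slice_from_natCast]
    conv_lhs => rw [hdec]
    rw [show pre.length + core.length = (pre ++ core).length by simp, List.drop_left]

-- the whole-function equality
theorem pv_main (content : String) :
    decode_escaped_plaintext content = decode_escaped_plaintext_alt content := by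
  unfold decode_escaped_plaintext decode_escaped_plaintext_alt
  simp only [pv_guard1]
  cases hg : (pvEsc content.toList 'n' || pvEsc content.toList 'r' || pvEsc content.toList 't' ||
      pvEsc content.toList '"' || pvEsc content.toList '/') with
  | false => rfl
  | true =>
    simp only [pv_strip_eq, pv_startswith_head, pv_endswith_getLast, pv_endswith2,
      pv_singleton_isIn, ← pv_esc_eq, pv_slice_one, pv_slice_neg_one, pv_prefix_eq,
      pv_trim_cond, pv_chain_eq_scan']
    rw [pv_suffix_eq _ (pv_rest_ne _ hg)]

-- ===== VERDICT (by name: the statement is the Claim_ definition above) =====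
theorem decode_escaped_plaintext_spec : Claim_equal_decode_escaped_plaintext := by
  intro content _
  exact pv_main content
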